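-- pv_equiv track=rewrite | github.com/BhawickJain/katas.py | katas/count_occurrences.py | count_occurrences_with_ignore
-- ===== SOURCE A (Python) =====
-- from typing import Dict
--
-- def count_occurrences_with_ignore(text: str, ignore_chars: str) -> dict:
--     """
--     Returns a dictionary of occurrences of every unique character present,
--     excluding any present in the ignore_chars input
--
--     args:
--         text -- string input to be counted
--         ignore_chars -- string contain all forbidden characters
--
--     time: O(n)
--     """
--     count: Dict[str, int] = {}
--     for char in text:
--         if char in ignore_chars:
--             continue
--         if char in count:
--             count[char] += 1
--         else:
--             count[char] = 1
--     return count
-- ===== SOURCE B (Python) =====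
-- def count_occurrences_with_ignore(text: str, ignore_chars: str) -> dict:
--     counts = {}
--     for char in text:
--         counts[char] = counts.get(char, 0) + 1
--     for char in ignore_chars:
--         counts.pop(char, None)
--     return counts
-- ===== Notes on version B (the rewrite author's own statement) =====
-- stated objective: alternative
-- what changed: B counts every character of the text in one unconditional pass and then deletes the ignored keys in a second pass over ignore_chars, instead of A's per-character membership test in ignore_chars while counting; same O(n) cost.
import Mathlib
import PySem

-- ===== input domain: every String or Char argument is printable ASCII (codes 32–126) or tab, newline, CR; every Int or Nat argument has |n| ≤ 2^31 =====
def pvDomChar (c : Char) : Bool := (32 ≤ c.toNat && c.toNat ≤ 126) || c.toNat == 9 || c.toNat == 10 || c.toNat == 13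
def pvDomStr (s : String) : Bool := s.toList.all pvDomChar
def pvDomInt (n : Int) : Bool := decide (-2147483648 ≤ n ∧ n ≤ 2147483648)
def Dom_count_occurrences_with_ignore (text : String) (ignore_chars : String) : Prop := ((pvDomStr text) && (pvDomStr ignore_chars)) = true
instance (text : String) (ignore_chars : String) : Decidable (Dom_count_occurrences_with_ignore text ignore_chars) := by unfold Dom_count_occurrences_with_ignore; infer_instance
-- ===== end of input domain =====

-- B counts every character in one unconditional pass and then deletes the ignored keys in a
-- second pass over ignore_chars, instead of A's membership test inside the counting loop (alternative decomposition, same cost).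

-- ===== PORT A =====
-- a dict key is the one-character string Python iterates
def pvKey (c : Char) : String := String.ofList [c]

def count_occurrences_with_ignore (text : String) (ignore_chars : String) : List (String × Int) :=
  (text.toList.foldl (fun (count : PySem.Dict String Int) (char : Char) =>
      if PySem.Str.isIn (pvKey char) ignore_chars then count            -- if char in ignore_chars: continue
      else if count.contains (pvKey char) then
        count.insert (pvKey char) (count.getD (pvKey char) 0 + 1)       -- count[char] += 1
      else count.insert (pvKey char) 1)                                 -- count[char] = 1
    PySem.Dict.empty).items

-- ===== PORT B =====
def count_occurrences_with_ignore_alt (text : String) (ignore_chars : String) : List (String × Int) :=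
  let counts := text.toList.foldl (fun (d : PySem.Dict String Int) (char : Char) =>
      d.insert (pvKey char) (d.getD (pvKey char) 0 + 1)) PySem.Dict.empty   -- counts[char] = counts.get(char, 0) + 1
  (ignore_chars.toList.foldl (fun (d : PySem.Dict String Int) (char : Char) =>
      d.erase (pvKey char)) counts).items                                   -- counts.pop(char, None): remove if present

-- ===== PRECONDITION & SPEC =====
def Spec_count_occurrences_with_ignore (text : String) (ignore_chars : String) (out : List (String × Int)) : Prop := out = count_occurrences_with_ignore_alt text ignore_chars
instance (text : String) (ignore_chars : String) (out : List (String × Int)) : Decidable (Spec_count_occurrences_with_ignore text ignore_chars out) := by unfold Spec_count_occurrences_with_ignore; infer_instance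

-- ===== CLAIM (what is proved, stated in full; the proofs are below) =====
def Claim_equal_count_occurrences_with_ignore : Prop := ∀ (text : String) (ignore_chars : String), Dom_count_occurrences_with_ignore text ignore_chars → Spec_count_occurrences_with_ignore text ignore_chars (count_occurrences_with_ignore text ignore_chars)

-- ===== LEMMAS AND PROOFS =====

theorem pvKey_inj {c c' : Char} (h : pvKey c = pvKey c') : c = c' := by
  have := congrArg String.toList h
  simpa [pvKey, String.toList_ofList] using this

-- the three list facts behind erase: filtering out key k' ignores the entries at other keys
theorem pv_filter_map_overwrite (k : String) (v : Int) (l : List (String × Int)) :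
    (l.map (fun p => if p.1 == k then (k, v) else p)).filter (fun p => !p.1 == k)
      = l.filter (fun p => !p.1 == k) := by
  induction l with
  | nil => rfl
  | cons p rest ih => by_cases hp : p.1 = k <;> simp_all

theorem pv_filter_map_comm {k k' : String} (h : k ≠ k') (v : Int) (l : List (String × Int)) :
    (l.map (fun p => if p.1 == k then (k, v) else p)).filter (fun p => !p.1 == k')
      = (l.filter (fun p => !p.1 == k')).map (fun p => if p.1 == k then (k, v) else p) := by
  induction l with
  | nil => rfl
  | cons p rest ih =>
    by_cases hp : p.1 = k
    · have : ¬ (k : String) = k' := h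
      simp_all
    · by_cases hp' : p.1 = k' <;> simp_all

theorem pv_any_filter_ne {k k' : String} (h : k ≠ k') (l : List (String × Int)) :
    (l.filter (fun p => !p.1 == k')).any (fun p => p.1 == k) = l.any (fun p => p.1 == k) := by
  induction l with
  | nil => rfl
  | cons p rest ih =>
    by_cases hk' : p.1 = k'
    · have hk : (p.1 == k) = false := by
        simp only [beq_eq_false_iff_ne, ne_eq, hk']
        exact fun e => h e.symm
      rw [List.filter_cons_of_neg (by simp [hk']), ih, List.any_cons, hk, Bool.false_or]
    · rw [List.filter_cons_of_pos (by simp [hk']), List.any_cons, List.any_cons, ih]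

theorem pv_find?_filter_ne {k k' : String} (h : k ≠ k') (l : List (String × Int)) :
    (l.filter (fun p => !p.1 == k')).find? (fun p => p.1 == k) = l.find? (fun p => p.1 == k) := by
  induction l with
  | nil => rfl
  | cons p rest ih =>
    by_cases hk' : p.1 = k'
    · have hk : ¬ (p.1 == k) = true := by
        simp only [beq_iff_eq, hk']
        exact fun e => h e.symm
      rw [List.filter_cons_of_neg (by simp [hk']), ih,
        List.find?_cons_of_neg (p := fun q => q.1 == k) (a := p) hk]
    · by_cases hk : p.1 = k
      · rw [List.filter_cons_of_pos (by simp [hk']),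
          List.find?_cons_of_pos (p := fun q => q.1 == k) (a := p) (by simp [hk]),
          List.find?_cons_of_pos (p := fun q => q.1 == k) (a := p) (by simp [hk])]
      · rw [List.filter_cons_of_pos (by simp [hk']),
          List.find?_cons_of_neg (p := fun q => q.1 == k) (a := p) (by simp [hk]),
          List.find?_cons_of_neg (p := fun q => q.1 == k) (a := p) (by simp [hk]), ih]

-- inserting a key and then erasing that same key is erasing it from the original dict
theorem erase_insert_self (d : PySem.Dict String Int) (k : String) (v : Int) :
    (d.insert k v).erase k = d.erase k := by
  rcases d with ⟨items⟩
  simp only [PySem.Dict.insert, PySem.Dict.erase]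
  split
  · exact congrArg PySem.Dict.mk (pv_filter_map_overwrite k v items)
  · simp [List.filter_append]

-- erasing a different key commutes with insert
theorem erase_insert_of_ne (d : PySem.Dict String Int) {k k' : String} (h : k ≠ k') (v : Int) :
    (d.insert k v).erase k' = (d.erase k').insert k v := by
  rcases d with ⟨items⟩
  have hcont : (PySem.Dict.mk (κ := String) (ν := Int) items |>.erase k').contains k
      = (PySem.Dict.mk (κ := String) (ν := Int) items).contains k := by
    simp only [PySem.Dict.contains, PySem.Dict.erase]
    exact pv_any_filter_ne h items
  simp only [PySem.Dict.insert, hcont]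
  split
  · simp only [PySem.Dict.erase]
    exact congrArg PySem.Dict.mk (pv_filter_map_comm h v items)
  · simp [PySem.Dict.erase, List.filter_append, h]

-- getD is unchanged by erasing a different key
theorem getD_erase_of_ne (d : PySem.Dict String Int) {k k' : String} (h : k ≠ k') (dflt : Int) :
    (d.erase k').getD k dflt = d.getD k dflt := by
  rcases d with ⟨items⟩
  simp only [PySem.Dict.getD, PySem.Dict.get?, PySem.Dict.erase]
  rw [pv_find?_filter_ne h items]

-- the erase pass over a char list
def pvEraseAll (l : List Char) (d : PySem.Dict String Int) : PySem.Dict String Int :=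
  l.foldl (fun d c => d.erase (pvKey c)) d

theorem pvEraseAll_cons (c : Char) (l : List Char) (d : PySem.Dict String Int) :
    pvEraseAll (c :: l) d = pvEraseAll l (d.erase (pvKey c)) := rfl

theorem pvEraseAll_insert_mem {l : List Char} {c : Char} (h : c ∈ l) (d : PySem.Dict String Int) (v : Int) :
    pvEraseAll l (d.insert (pvKey c) v) = pvEraseAll l d := by
  induction l generalizing d with
  | nil => cases h
  | cons c' l ih =>
    by_cases hc : c' = c
    · subst hc
      rw [pvEraseAll_cons, pvEraseAll_cons, erase_insert_self]
    · have hm : c ∈ l := by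
        rcases List.mem_cons.mp h with h1 | h1
        · exact absurd h1.symm hc
        · exact h1
      have hne : pvKey c ≠ pvKey c' := fun e => hc (pvKey_inj e).symm
      rw [pvEraseAll_cons, pvEraseAll_cons, erase_insert_of_ne _ hne]
      exact ih hm _

theorem pvEraseAll_insert_not_mem {l : List Char} {c : Char} (h : c ∉ l) (d : PySem.Dict String Int) (v : Int) :
    pvEraseAll l (d.insert (pvKey c) v) = (pvEraseAll l d).insert (pvKey c) v := by
  induction l generalizing d with
  | nil => rfl
  | cons c' l ih =>
    have hc : c' ≠ c := fun e => h (by simp [e])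
    have hne : pvKey c ≠ pvKey c' := fun e => hc ((pvKey_inj e).symm)
    rw [pvEraseAll_cons, pvEraseAll_cons, erase_insert_of_ne _ hne]
    exact ih (fun hm => h (List.mem_cons_of_mem _ hm)) _

theorem getD_pvEraseAll_not_mem {l : List Char} {c : Char} (h : c ∉ l) (d : PySem.Dict String Int) (dflt : Int) :
    (pvEraseAll l d).getD (pvKey c) dflt = d.getD (pvKey c) dflt := by
  induction l generalizing d with
  | nil => rfl
  | cons c' l ih =>
    have hc : c' ≠ c := fun e => h (by simp [e])
    have hne : pvKey c ≠ pvKey c' := fun e => hc ((pvKey_inj e).symm)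
    rw [pvEraseAll_cons, ih (fun hm => h (List.mem_cons_of_mem _ hm)), getD_erase_of_ne _ hne]

-- 'char in ignore_chars' for a one-character needle is list membership
theorem isIn_key_iff (c : Char) (s : String) :
    PySem.Str.isIn (pvKey c) s = true ↔ c ∈ s.toList := by
  rw [PySem.Str.isIn_iff_infix]
  simp [pvKey, String.toList_ofList, List.singleton_infix_iff]

-- A's loop body, when the char is kept, is exactly the unconditional increment
theorem stepA_not_ignored (d : PySem.Dict String Int) (c : Char) :
    (if d.contains (pvKey c) then d.insert (pvKey c) (d.getD (pvKey c) 0 + 1)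
     else d.insert (pvKey c) 1) = d.insert (pvKey c) (d.getD (pvKey c) 0 + 1) := by
  by_cases h : d.contains (pvKey c)
  · simp [h]
  · have h0 : d.contains (pvKey c) = false := by simpa using h
    simp [h, PySem.Dict.getD_of_not_contains d 0 h0]

-- main invariant: erasing the ignored keys after B's count loop equals running A's loop on the erased state
theorem pvMain (ign : String) (cs : List Char) (d : PySem.Dict String Int) :
    pvEraseAll ign.toList
      (cs.foldl (fun d c => d.insert (pvKey c) (d.getD (pvKey c) 0 + 1)) d)
    = cs.foldl (fun d c =>
        if PySem.Str.isIn (pvKey c) ign then d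
        else if d.contains (pvKey c) then d.insert (pvKey c) (d.getD (pvKey c) 0 + 1)
        else d.insert (pvKey c) 1) (pvEraseAll ign.toList d) := by
  induction cs generalizing d with
  | nil => rfl
  | cons c cs ih =>
    simp only [List.foldl]
    by_cases hmem : c ∈ ign.toList
    · rw [if_pos ((isIn_key_iff c ign).mpr hmem), ih, pvEraseAll_insert_mem hmem]
    · rw [if_neg (fun ht => hmem ((isIn_key_iff c ign).mp ht)), stepA_not_ignored, ih,
        pvEraseAll_insert_not_mem hmem, getD_pvEraseAll_not_mem hmem]

theorem pvEraseAll_empty (l : List Char) : pvEraseAll l PySem.Dict.empty = PySem.Dict.empty := by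
  induction l with
  | nil => rfl
  | cons c l ih => simpa [pvEraseAll_cons, PySem.Dict.erase, PySem.Dict.empty] using ih

-- ===== VERDICT (by name: the statement is the Claim_ definition above) =====
theorem count_occurrences_with_ignore_spec : Claim_equal_count_occurrences_with_ignore := by
  intro text ign _
  unfold Spec_count_occurrences_with_ignore count_occurrences_with_ignore count_occurrences_with_ignore_alt
  have h := pvMain ign text.toList PySem.Dict.empty
  rw [pvEraseAll_empty] at h
  simp only [pvEraseAll] at h
  rw [← h]
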